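-- pv_equiv track=rewrite | github.com/Pouria-D/Crypto-Advanced-Topics-Spring-2023 | Project 3 _ Lightweight Crypto/SboxCharectristic.py | lessthan_set
-- ===== SOURCE A (Python) =====
-- def lessthan_set(u,n):
--     set_out=set()
--     for i in range(n):
--         mask=2**i
--         if u & mask == mask:
--             u_i=u & (mask ^ (2**n-1))
--             set_out.add(u_i)
--             set_out.update(lessthan_set(u_i,n))
--     return set_out
-- ===== SOURCE B (Python) =====
-- def lessthan_set(u, n):
--     # Iterative construction: scan bits of u (masked to n bits) from high to low,
--     # doubling a list of already-found submasks; each submask is produced exactly once.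
--     if n <= 0:
--         return set()
--     m = u & ((1 << n) - 1)
--     subs = []          # proper submasks of t, in construction order
--     t = 0              # mask of the bits of m processed so far (the high ones)
--     for i in range(n - 1, -1, -1):
--         if (m >> i) & 1:
--             subs = [t] + subs + [x + (1 << i) for x in subs]
--             t += 1 << i
--     return set(subs)
-- ===== Notes on version B (the rewrite author's own statement) =====
-- stated objective: faster
-- what changed: Replaced the redundant per-bit recursion (which recomputes the submask set of every child and dedups through a set) by a single high-to-low bit scan that doubles an explicit list of submasks, producing each proper submask exactly once.
import Mathlib
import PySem

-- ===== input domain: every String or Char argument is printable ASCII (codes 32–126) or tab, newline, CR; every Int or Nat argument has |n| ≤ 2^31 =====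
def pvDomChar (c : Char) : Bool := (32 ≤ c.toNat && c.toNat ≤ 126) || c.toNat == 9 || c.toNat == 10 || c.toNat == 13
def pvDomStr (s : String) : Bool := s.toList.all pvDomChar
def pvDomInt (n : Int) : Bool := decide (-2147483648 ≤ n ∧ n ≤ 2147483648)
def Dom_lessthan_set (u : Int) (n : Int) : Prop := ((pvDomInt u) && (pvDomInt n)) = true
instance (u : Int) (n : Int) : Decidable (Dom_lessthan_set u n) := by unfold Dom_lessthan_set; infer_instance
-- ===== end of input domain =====

-- B replaces A's redundant per-bit recursion by a single high-to-low bit scan that doubles an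
-- explicit list of submasks (objective: faster; return value only — neither program mutates anything).

-- ===== PORT A =====
-- Bit-level helpers needed by the port's termination proof (cited by name in decreasing_by).
-- pvUbit u j = bit j of u in Python's infinite two's complement; pvBandNat u w = (u & w).toNat for w ≥ 0.
def pvUbit (u : Int) (j : Nat) : Bool :=
  if 0 ≤ u then u.toNat.testBit j else !((-u - 1).toNat.testBit j)
def pvBandNat (u : Int) (w : Nat) : Nat :=
  if 0 ≤ u then u.toNat &&& w else w - (w &&& (-u - 1).toNat)

theorem pvBand_coe (u : Int) (w : Nat) :
    PySem.Int.band u (w : Int) = (pvBandNat u w : Int) := by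
  unfold PySem.Int.band pvBandNat
  have h0 : (0:Int) ≤ (w : Int) := Int.natCast_nonneg w
  split_ifs with h1 <;> simp

theorem pvAnd_div_two (w k : Nat) : (w &&& k) / 2 = w / 2 &&& k / 2 := by
  apply Nat.eq_of_testBit_eq
  intro j
  simp [Nat.testBit_div_two, Nat.testBit_and]

theorem pvAnd_mod_two (w k : Nat) : ((w &&& k) % 2 = 1) ↔ ((w % 2 = 1) ∧ (k % 2 = 1)) := by
  have h := Nat.testBit_and w k 0
  simp only [Nat.testBit_zero, ← Bool.decide_and, decide_eq_decide] at h
  exact h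

theorem pvTb_sub_and : ∀ (j w k : Nat), (w - (w &&& k)).testBit j = (w.testBit j && !(k.testBit j)) := by
  intro j
  induction j with
  | zero =>
    intro w k
    have hle : w &&& k ≤ w := Nat.and_le_left
    have h0 := pvAnd_mod_two w k
    simp only [Nat.testBit_zero, ← decide_not, ← Bool.decide_and, decide_eq_decide]
    omega
  | succ j ih =>
    intro w k
    have hle : w &&& k ≤ w := Nat.and_le_left
    have h0 := pvAnd_mod_two w k
    have hsub : (w - (w &&& k)) / 2 = w / 2 - (w &&& k) / 2 := by omega
    rw [← Nat.testBit_div_two, hsub, pvAnd_div_two, ih (w/2) (k/2),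
        Nat.testBit_div_two, Nat.testBit_div_two]

theorem pvTb_bandNat (u : Int) (w : Nat) (j : Nat) :
    (pvBandNat u w).testBit j = (w.testBit j && pvUbit u j) := by
  unfold pvBandNat pvUbit
  split_ifs with h
  · rw [Nat.testBit_and, Bool.and_comm]
  · exact pvTb_sub_and j w _

theorem pvUbit_coe (w : Nat) (j : Nat) : pvUbit (w : Int) j = w.testBit j := by
  unfold pvUbit
  simp


theorem pvGoDec (u : Int) (n' i : Nat) (hi : i < n')
    (hg : PySem.Int.band u ((2:Int) ^ i) = (2:Int) ^ i) :
    (PySem.Int.band (PySem.Int.band u (PySem.Int.bxor ((2:Int) ^ i) ((2:Int) ^ n' - 1))) ((2:Int) ^ n' - 1)).toNat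
      < (PySem.Int.band u ((2:Int) ^ n' - 1)).toNat := by
  have hc1 : ((2:Int) ^ i) = ((2 ^ i : Nat) : Int) := by push_cast; ring
  have hc2 : ((2:Int) ^ n' - 1) = ((2 ^ n' - 1 : Nat) : Int) := by
    have h1 : (1:Nat) ≤ 2 ^ n' := Nat.one_le_two_pow
    push_cast [h1]; ring
  -- the guard gives bit i of u
  have hub : pvUbit u i = true := by
    rw [hc1, pvBand_coe] at hg
    have h2 : pvBandNat u (2 ^ i) = 2 ^ i := by exact_mod_cast hg
    have h3 := pvTb_bandNat u (2 ^ i) i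
    rw [h2, Nat.testBit_two_pow_self] at h3
    simpa using h3.symm
  have hx : PySem.Int.bxor ((2:Int) ^ i) ((2:Int) ^ n' - 1)
      = ((2 ^ i ^^^ (2 ^ n' - 1) : Nat) : Int) := by
    rw [hc1, hc2]
    exact_mod_cast PySem.Int.bxor_natCast (2 ^ i) (2 ^ n' - 1)
  rw [hx, hc2, pvBand_coe, pvBand_coe, pvBand_coe]
  simp only [Int.toNat_natCast]
  apply Nat.lt_of_testBit i
  · rw [pvTb_bandNat, pvUbit_coe, pvTb_bandNat]
    simp [Nat.testBit_xor, Nat.testBit_two_pow_self, Nat.testBit_two_pow_sub_one, hi]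
  · rw [pvTb_bandNat]
    simp [Nat.testBit_two_pow_sub_one, hi, hub]
  · intro j hj
    rw [pvTb_bandNat, pvUbit_coe, pvTb_bandNat, pvTb_bandNat]
    have hne : i ≠ j := Nat.ne_of_lt hj
    by_cases h : j < n' <;>
      simp [Nat.testBit_xor, Nat.testBit_two_pow_sub_one, hne, h]

-- the for-loop of A : iterate i over range(n); on each set bit add u_i and all of lessthan_set(u_i, n)
def lessthan_setGo (n : Int) (u : Int) : List (Fin n.toNat) → List Int → List Int
  | [], set_out => set_out
  | i :: rest, set_out =>
    let mask : Int := (2:Int) ^ (i : Nat)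
    if hg : PySem.Int.band u mask = mask then
      let u_i : Int := PySem.Int.band u (PySem.Int.bxor mask ((2:Int) ^ n.toNat - 1))
      lessthan_setGo n u rest
        (PySem.Set.update (PySem.Set.add set_out u_i)
          (lessthan_setGo n u_i (List.finRange n.toNat) []))
    else
      lessthan_setGo n u rest set_out
termination_by l _ => ((PySem.Int.band u ((2:Int) ^ n.toNat - 1)).toNat, l.length)
decreasing_by
  · exact Prod.Lex.left _ _ (pvGoDec u n.toNat i.val i.isLt hg)
  · exact Prod.Lex.right _ (by simp)
  · exact Prod.Lex.right _ (by simp)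

def lessthan_set (u : Int) (n : Int) : List Int :=
  lessthan_setGo n u (List.finRange n.toNat) []

-- ===== PORT B =====
-- the for-loop of B : i runs n-1, n-2, …, 0; state (subs, t); on each set bit of m,
-- subs := [t] + subs + [x + 2^i for x in subs], t := t + 2^i
def lessthan_setAltGo (m : Int) : Nat → List Int × Int → List Int × Int
  | 0, st => st
  | k + 1, st =>
    if PySem.Int.band (m >>> k) 1 = 1 then
      lessthan_setAltGo m k
        (st.2 :: st.1 ++ st.1.map (fun x => x + (1:Int) <<< k), st.2 + (1:Int) <<< k)
    else
      lessthan_setAltGo m k st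

def lessthan_set_alt (u : Int) (n : Int) : List Int :=
  if n ≤ 0 then PySem.Set.empty
  else
    let m : Int := PySem.Int.band u ((1:Int) <<< n.toNat - 1)
    PySem.Set.ofList (lessthan_setAltGo m n.toNat ([], 0)).1

-- ===== PRECONDITION & SPEC =====
def Spec_lessthan_set (u : Int) (n : Int) (out : List Int) : Prop := out = lessthan_set_alt u n
instance (u : Int) (n : Int) (out : List Int) : Decidable (Spec_lessthan_set u n out) := by
  unfold Spec_lessthan_set; infer_instance

-- ===== CLAIM (what is proved, stated in full; the proofs are below) =====
def Claim_equal_lessthan_set : Prop :=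
  ∀ (u : Int) (n : Int), Dom_lessthan_set u n → Spec_lessthan_set u n (lessthan_set u n)

-- ===== LEMMAS AND PROOFS =====

-- canonical description: pvH bs = the list of proper submasks of the mask with (ascending) bit
-- positions bs, in exactly the order both ports produce them
def pvVal (bs : List Nat) : Int := (bs.map (fun i => (2:Int) ^ i)).sum

def pvH : List Nat → List Int
  | [] => []
  | i :: bs => pvVal bs :: (pvH bs ++ (pvH bs).map (fun x => x + (2:Int) ^ i))

theorem pvVal_cons (i : Nat) (bs : List Nat) : pvVal (i :: bs) = 2 ^ i + pvVal bs := by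
  simp [pvVal]

theorem pvH_lt : ∀ (bs : List Nat), ∀ x ∈ pvH bs, x < pvVal bs := by
  intro bs
  induction bs with
  | nil => simp [pvH]
  | cons i bs ih =>
    intro x hx
    have hpos : (0:Int) < 2 ^ i := by positivity
    rw [pvVal_cons]
    simp only [pvH, List.mem_cons, List.mem_append, List.mem_map] at hx
    rcases hx with rfl | hx | ⟨y, hy, rfl⟩
    · omega
    · have := ih x hx; omega
    · have := ih y hy; omega

theorem pvVal_dvd (k : Nat) : ∀ (bs : List Nat), (∀ j ∈ bs, k ≤ j) → (2:Int) ^ k ∣ pvVal bs := by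
  intro bs
  induction bs with
  | nil => simp [pvVal]
  | cons i bs ih =>
    intro h
    rw [pvVal_cons]
    exact dvd_add (pow_dvd_pow 2 (h i (by simp))) (ih fun j hj => h j (by simp [hj]))

theorem pvH_dvd (k : Nat) : ∀ (bs : List Nat), (∀ j ∈ bs, k ≤ j) → ∀ x ∈ pvH bs, (2:Int) ^ k ∣ x := by
  intro bs
  induction bs with
  | nil => simp [pvH]
  | cons i bs ih =>
    intro h x hx
    have hbs : ∀ j ∈ bs, k ≤ j := fun j hj => h j (by simp [hj])
    simp only [pvH, List.mem_cons, List.mem_append, List.mem_map] at hx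
    rcases hx with rfl | hx | ⟨y, hy, rfl⟩
    · exact pvVal_dvd k bs hbs
    · exact ih hbs x hx
    · exact dvd_add (ih hbs y hy) (pow_dvd_pow 2 (h i (by simp)))

theorem pvNotDvd (i : Nat) (x : Int) (hx : (2:Int) ^ (i+1) ∣ x) : ¬ (2:Int) ^ (i+1) ∣ (x + 2 ^ i) := by
  intro h
  have h2 : (2:Int) ^ (i+1) ∣ (2:Int) ^ i := (Int.dvd_add_right hx).mp h
  have h3 : (2:Int) ^ (i+1) ≤ 2 ^ i := Int.le_of_dvd (by positivity) h2
  have h4 : (2:Int) ^ i < 2 ^ (i+1) := by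
    have : (2:Int) ^ i > 0 := by positivity
    calc (2:Int) ^ i < 2 ^ i + 2 ^ i := by omega
    _ = 2 ^ (i+1) := by ring
  omega

theorem pvH_nodup : ∀ (bs : List Nat), bs.Pairwise (· < ·) → (pvH bs).Nodup := by
  intro bs
  induction bs with
  | nil => simp [pvH]
  | cons i bs ih =>
    intro hp
    rw [List.pairwise_cons] at hp
    have hdvd : ∀ x ∈ pvH bs, (2:Int) ^ (i+1) ∣ x :=
      pvH_dvd (i+1) bs (fun j hj => hp.1 j hj)
    have hvdvd : (2:Int) ^ (i+1) ∣ pvVal bs := pvVal_dvd (i+1) bs (fun j hj => hp.1 j hj)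
    simp only [pvH, List.nodup_cons, List.nodup_append, List.mem_append, List.mem_map]
    refine ⟨?_, ih hp.2, ?_, ?_⟩
    · rintro (hv | ⟨y, hy, hxy⟩)
      · exact absurd (pvH_lt bs _ hv) (by omega)
      · rw [← hxy] at hvdvd
        exact pvNotDvd i y (hdvd y hy) hvdvd
    · exact (List.nodup_map_iff (fun a b h => by omega)).mpr (ih hp.2)
    · intro x hx b hb
      rcases hb with ⟨y, hy, hxy⟩
      intro heq
      have hdx := hdvd x hx
      rw [heq, ← hxy] at hdx
      exact pvNotDvd i y (hdvd y hy) hdx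

theorem pvH_mem_iff : ∀ (bs : List Nat) (x : Int),
    x ∈ pvH bs ↔ ∃ cs, List.Sublist cs bs ∧ cs ≠ bs ∧ x = pvVal cs := by
  intro bs
  induction bs with
  | nil =>
    intro x
    simp [pvH]
  | cons i bs ih =>
    intro x
    constructor
    · intro hx
      simp only [pvH, List.mem_cons, List.mem_append, List.mem_map] at hx
      rcases hx with rfl | hx | ⟨y, hy, rfl⟩
      · exact ⟨bs, List.sublist_cons_self i bs, by
          intro h; exact absurd (congrArg List.length h) (by simp), rfl⟩
      · obtain ⟨cs, hsub, hne, rfl⟩ := (ih x).mp hx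
        refine ⟨cs, hsub.trans (List.sublist_cons_self i bs), ?_, rfl⟩
        intro h
        have := hsub.length_le
        rw [h] at this
        simp at this
      · obtain ⟨cs, hsub, hne, rfl⟩ := (ih y).mp hy
        refine ⟨i :: cs, List.cons_sublist_cons.mpr hsub, ?_, by rw [pvVal_cons]; ring⟩
        intro h
        exact hne (by injection h)
    · rintro ⟨cs, hsub, hne, rfl⟩
      simp only [pvH, List.mem_cons, List.mem_append, List.mem_map]
      rcases List.sublist_cons_iff.mp hsub with hcs | ⟨cs', rfl, hcs'⟩
      · by_cases h : cs = bs
        · subst h; exact Or.inl rfl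
        · exact Or.inr (Or.inl ((ih _).mpr ⟨cs, hcs, h, rfl⟩))
      · right; right
        have hne' : cs' ≠ bs := by
          intro h; exact hne (by rw [h])
        exact ⟨pvVal cs', (ih _).mpr ⟨cs', hcs', hne', rfl⟩, by rw [pvVal_cons]; ring⟩

theorem pvUpdate_noop : ∀ (X : List Int) (s : List Int), (∀ x ∈ X, x ∈ s) → PySem.Set.update s X = s := by
  intro X
  induction X with
  | nil => intro s _; rfl
  | cons x X ih =>
    intro s h
    show PySem.Set.update (PySem.Set.add s x) X = s
    rw [PySem.Set.add_of_mem (h x (by simp))]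
    exact ih s fun y hy => h y (by simp [hy])

theorem pvUpdate_fresh : ∀ (X : List Int) (s : List Int), X.Nodup → (∀ x ∈ X, x ∉ s) →
    PySem.Set.update s X = s ++ X := by
  intro X
  induction X with
  | nil => intro s _ _; simp
  | cons x X ih =>
    intro s hnd h
    show PySem.Set.update (PySem.Set.add s x) X = s ++ x :: X
    rw [PySem.Set.add_of_not_mem (h x (by simp))]
    rw [List.nodup_cons] at hnd
    rw [ih (s ++ [x]) hnd.2 ?_]
    · simp
    · intro y hy
      simp only [List.mem_append, List.mem_singleton]
      rintro (hys | rfl)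
      · exact h y (by simp [hy]) hys
      · exact hnd.1 hy

theorem pvUpdate_append (s : List Int) (X Y : List Int) :
    PySem.Set.update s (X ++ Y) = PySem.Set.update (PySem.Set.update s X) Y :=
  List.foldl_append

def pvBits (n : Nat) (m : Nat) : List Nat := (List.range n).filter (fun j => m.testBit j)

theorem pvBits_pairwise (n m : Nat) : (pvBits n m).Pairwise (· < ·) :=
  List.Pairwise.sublist (List.filter_sublist ..) List.pairwise_lt_range

theorem pvBits_nodup (n m : Nat) : (pvBits n m).Nodup :=
  (pvBits_pairwise n m).imp Nat.ne_of_lt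

theorem pvMem_bits (n m j : Nat) : j ∈ pvBits n m ↔ j < n ∧ m.testBit j := by
  simp [pvBits]

theorem pvVal_bits : ∀ (n w : Nat), w < 2 ^ n → (w : Int) = pvVal (pvBits n w) := by
  intro n
  induction n with
  | zero =>
    intro w hw
    interval_cases w
    simp [pvBits, pvVal]
  | succ n ih =>
    intro w hw
    have hpos : 0 < 2 ^ n := by positivity
    obtain ⟨q, hq⟩ : ∃ q, q = w / 2 ^ n := ⟨_, rfl⟩
    have hw1 : w = 2 ^ n * q + w % 2 ^ n := by rw [hq]; exact (Nat.div_add_mod w (2 ^ n)).symm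
    have hr : w % 2 ^ n < 2 ^ n := Nat.mod_lt _ hpos
    have hq2 : q < 2 := by
      rw [hq]
      exact Nat.div_lt_of_lt_mul (by rw [Nat.pow_succ] at hw; exact hw)
    have htbq : w.testBit n = decide (q % 2 = 1) := by
      rw [Nat.testBit_eq_decide_div_mod_eq, hq]
    have hmod : w % 2 ^ n < 2 ^ n := hr
    have hfil : (List.range n).filter (fun j => w.testBit j)
        = (List.range n).filter (fun j => (w % 2 ^ n).testBit j) := by
      apply List.filter_congr
      intro j hj
      rw [List.mem_range] at hj
      simp [Nat.testBit_mod_two_pow, hj]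
    unfold pvBits
    rw [List.range_succ, List.filter_append, hfil]
    show (w : Int) = pvVal (pvBits n (w % 2 ^ n) ++ List.filter (fun j => w.testBit j) [n])
    have hsplit : pvVal (pvBits n (w % 2 ^ n) ++ List.filter (fun j => w.testBit j) [n])
        = pvVal (pvBits n (w % 2 ^ n)) + pvVal (List.filter (fun j => w.testBit j) [n]) := by
      simp [pvVal]
    rw [hsplit, ← ih _ hmod]
    interval_cases q
    · have htb : w.testBit n = false := by rw [htbq]; simp
      have hww : w = w % 2 ^ n := by simpa using hw1
      simp [htb, pvVal]
      exact_mod_cast congrArg (Nat.cast : Nat → Int) hww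
    · have htb : w.testBit n = true := by rw [htbq]; simp
      simp only [List.filter_cons, htb, if_pos]
      have h1 : pvVal [n] = 2 ^ n := by simp [pvVal]
      have h2 : (List.filter (fun j => w.testBit j) ([] : List Nat)) = [] := rfl
      show (w : Int) = _ + pvVal [n]
      rw [h1]
      have : (w : Int) = ((w % 2 ^ n : Nat) : Int) + ((2 ^ n : Nat) : Int) := by
        exact_mod_cast congrArg (Nat.cast : Nat → Int) (by omega : w = w % 2 ^ n + 2 ^ n)
      rw [this]
      push_cast
      ring

theorem pvVal_split : ∀ (l : List Nat), l.Nodup → ∀ j ∈ l,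
    pvVal l = 2 ^ j + pvVal (l.filter (fun t => t ≠ j)) := by
  intro l
  induction l with
  | nil => intro _ j hj; simp at hj
  | cons a l ih =>
    intro hnd j hj
    rw [List.nodup_cons] at hnd
    rcases List.mem_cons.mp hj with rfl | hjl
    · rw [pvVal_cons]
      congr 1
      simp only [List.filter_cons]
      rw [if_neg (by simp)]
      rw [List.filter_eq_self.mpr (fun b hb => by simp; intro h; subst h; exact hnd.1 hb)]
    · have hne : a ≠ j := fun h => hnd.1 (h ▸ hjl)
      simp only [List.filter_cons]
      rw [if_pos (by simp [hne])]
      rw [pvVal_cons, pvVal_cons, ih hnd.2 j hjl]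
      ring

def pvStepA (full : List Nat) (s : List Int) (j : Nat) : List Int :=
  PySem.Set.update (PySem.Set.add s (pvVal (full.filter (fun t => t ≠ j))))
    (pvH (full.filter (fun t => t ≠ j)))

theorem pvAdd_map (i : Nat) (A0 B : List Int) (a : Int)
    (hA : ∀ x ∈ A0, (2:Int) ^ (i+1) ∣ x) (ha : (2:Int) ^ (i+1) ∣ a) :
    PySem.Set.add (A0 ++ B.map (fun x => x + (2:Int) ^ i)) (a + (2:Int) ^ i)
      = A0 ++ (PySem.Set.add B a).map (fun x => x + (2:Int) ^ i) := by
  have hnA : (a + (2:Int) ^ i) ∉ A0 := fun h => pvNotDvd i a ha (hA _ h)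
  have hmem : (a + (2:Int) ^ i) ∈ A0 ++ B.map (fun x => x + (2:Int) ^ i) ↔ a ∈ B := by
    simp only [List.mem_append, List.mem_map]
    constructor
    · rintro (h | ⟨y, hy, hxy⟩)
      · exact absurd h hnA
      · have : y = a := by omega
        rwa [← this]
    · intro h; exact Or.inr ⟨a, h, rfl⟩
  by_cases h : a ∈ B
  · rw [PySem.Set.add_of_mem (hmem.mpr h), PySem.Set.add_of_mem h]
  · rw [PySem.Set.add_of_not_mem (fun hc => h (hmem.mp hc)), PySem.Set.add_of_not_mem h]
    simp

theorem pvUpdate_map (i : Nat) : ∀ (Y : List Int) (A0 B : List Int),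
    (∀ x ∈ A0, (2:Int) ^ (i+1) ∣ x) → (∀ y ∈ Y, (2:Int) ^ (i+1) ∣ y) →
    PySem.Set.update (A0 ++ B.map (fun x => x + (2:Int) ^ i)) (Y.map (fun x => x + (2:Int) ^ i))
      = A0 ++ (PySem.Set.update B Y).map (fun x => x + (2:Int) ^ i) := by
  intro Y
  induction Y with
  | nil => intro A0 B _ _; rfl
  | cons y Y ih =>
    intro A0 B hA hY
    show PySem.Set.update (PySem.Set.add _ _) _ = _
    rw [pvAdd_map i A0 B y hA (hY y (by simp))]
    exact ih A0 _ hA fun z hz => hY z (by simp [hz])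

theorem pvH_subset (rest : List Nat) (j : Nat) (hj : j ∈ rest) :
    ∀ x ∈ pvH (rest.filter (fun t => t ≠ j)), x ∈ pvH rest := by
  intro x hx
  obtain ⟨cs, hsub, _, rfl⟩ := (pvH_mem_iff _ x).mp hx
  refine (pvH_mem_iff _ _).mpr ⟨cs, hsub.trans (List.filter_sublist ..), ?_, rfl⟩
  intro h
  have : j ∉ cs := fun hc => by
    have := hsub.mem hc
    simp at this
  rw [h] at this
  exact this hj

theorem pvVal_filter_mem (rest : List Nat) (j : Nat) (hj : j ∈ rest) :
    pvVal (rest.filter (fun t => t ≠ j)) ∈ pvH rest := by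
  refine (pvH_mem_iff _ _).mpr ⟨_, List.filter_sublist .., ?_, rfl⟩
  intro h
  have : j ∉ rest.filter (fun t => t ≠ j) := by simp
  rw [h] at this
  exact this hj

theorem pvStep_comm (i : Nat) (rest : List Nat) (hp : (i :: rest).Pairwise (· < ·))
    (j : Nat) (hj : j ∈ rest) (B : List Int) :
    pvStepA (i :: rest) ((pvVal rest :: pvH rest) ++ B.map (fun x => x + (2:Int) ^ i)) j
      = (pvVal rest :: pvH rest) ++ (pvStepA rest B j).map (fun x => x + (2:Int) ^ i) := by
  rw [List.pairwise_cons] at hp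
  have hgt : ∀ t ∈ rest, i + 1 ≤ t := fun t ht => hp.1 t ht
  have hij : i ≠ j := Nat.ne_of_lt (hp.1 j hj)
  have hA : ∀ x ∈ pvVal rest :: pvH rest, (2:Int) ^ (i+1) ∣ x := by
    intro x hx
    rcases List.mem_cons.mp hx with rfl | hx
    · exact pvVal_dvd _ rest hgt
    · exact pvH_dvd _ rest hgt x hx
  have hfil : (i :: rest).filter (fun t => t ≠ j) = i :: rest.filter (fun t => t ≠ j) := by
    simp [hij]
  have hds : ∀ t ∈ rest.filter (fun t => t ≠ j), i + 1 ≤ t := by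
    intro t ht
    exact hgt t (List.mem_of_mem_filter ht)
  unfold pvStepA
  rw [hfil]
  simp only [pvH]
  rw [pvVal_cons]
  rw [add_comm ((2:Int) ^ i) (pvVal (rest.filter (fun t => t ≠ j)))]
  rw [pvAdd_map i _ B _ hA (pvVal_dvd _ _ hds)]
  show PySem.Set.update
      (PySem.Set.add ((pvVal rest :: pvH rest)
          ++ (PySem.Set.add B (pvVal (rest.filter (fun t => t ≠ j)))).map (fun x => x + (2:Int) ^ i))
        (pvVal (rest.filter (fun t => t ≠ j))))
      (pvH (rest.filter (fun t => t ≠ j))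
        ++ (pvH (rest.filter (fun t => t ≠ j))).map (fun x => x + (2:Int) ^ i)) = _
  rw [PySem.Set.add_of_mem
      (List.mem_append_left _ (List.mem_cons_of_mem _ (pvVal_filter_mem rest j hj)))]
  rw [pvUpdate_append]
  rw [pvUpdate_noop _ _
      (fun x hx => List.mem_append_left _ (List.mem_cons_of_mem _ (pvH_subset rest j hj x hx)))]
  exact pvUpdate_map i _ _ _ hA (fun y hy => pvH_dvd _ _ hds y hy)

theorem pvGen (i : Nat) (rest : List Nat) (hp : (i :: rest).Pairwise (· < ·)) :
    ∀ (l : List Nat), (∀ j ∈ l, j ∈ rest) → ∀ (B : List Int),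
      l.foldl (pvStepA (i :: rest)) ((pvVal rest :: pvH rest) ++ B.map (fun x => x + (2:Int) ^ i))
        = (pvVal rest :: pvH rest) ++ (l.foldl (pvStepA rest) B).map (fun x => x + (2:Int) ^ i) := by
  intro l
  induction l with
  | nil => intro _ B; rfl
  | cons j l ih =>
    intro hl B
    rw [List.foldl_cons, List.foldl_cons,
        pvStep_comm i rest hp j (hl j (by simp)) B]
    exact ih (fun t ht => hl t (by simp [ht])) _

theorem pvTA : ∀ (bs : List Nat), bs.Pairwise (· < ·) → bs.foldl (pvStepA bs) [] = pvH bs := by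
  intro bs
  induction bs with
  | nil => intro _; rfl
  | cons i rest ih =>
    intro hp
    have hp' := (List.pairwise_cons.mp hp)
    have hfil : (i :: rest).filter (fun t => t ≠ i) = rest := by
      have hne : ∀ t ∈ rest, t ≠ i := fun t ht => Nat.ne_of_gt (hp'.1 t ht)
      simp only [List.filter_cons]
      rw [if_neg (by simp)]
      exact List.filter_eq_self.mpr (fun a ha => by simp [hne a ha])
    have hstep : pvStepA (i :: rest) [] i = (pvVal rest :: pvH rest) ++ ([] : List Int).map (fun x => x + (2:Int) ^ i) := by
      unfold pvStepA
      rw [hfil]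
      rw [PySem.Set.add_of_not_mem (by simp)]
      rw [pvUpdate_fresh _ _ (pvH_nodup rest hp'.2) ?fresh]
      · simp
      case fresh =>
        intro x hx
        have := pvH_lt rest x hx
        simp only [List.nil_append, List.mem_singleton]
        omega
    rw [List.foldl_cons, hstep, pvGen i rest hp rest (fun j hj => hj) [], ih hp'.2]
    simp [pvH]

theorem pvGuard_iff (u : Int) (n' i : Nat) (hi : i < n') :
    (PySem.Int.band u ((2:Int) ^ i) = (2:Int) ^ i) ↔ (pvBandNat u (2 ^ n' - 1)).testBit i = true := by
  rw [show ((2:Int) ^ i) = ((2 ^ i : Nat) : Int) by push_cast; ring, pvBand_coe, Nat.cast_inj]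
  rw [pvTb_bandNat, Nat.testBit_two_pow_sub_one]
  simp only [hi, decide_true, Bool.true_and]
  constructor
  · intro h
    have h2 := pvTb_bandNat u (2 ^ i) i
    rw [h, Nat.testBit_two_pow_self] at h2
    simpa using h2.symm
  · intro h
    apply Nat.eq_of_testBit_eq
    intro j
    rw [pvTb_bandNat]
    by_cases hj : i = j
    · subst hj; simp [Nat.testBit_two_pow_self, h]
    · simp [hj]

theorem pvUi_coe (u : Int) (n' i : Nat) :
    PySem.Int.band u (PySem.Int.bxor ((2:Int) ^ i) ((2:Int) ^ n' - 1))
      = ((pvBandNat u (2 ^ i ^^^ (2 ^ n' - 1)) : Nat) : Int) := by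
  have hc1 : ((2:Int) ^ i) = ((2 ^ i : Nat) : Int) := by push_cast; ring
  have hc2 : ((2:Int) ^ n' - 1) = ((2 ^ n' - 1 : Nat) : Int) := by
    have h1 : (1:Nat) ≤ 2 ^ n' := Nat.one_le_two_pow
    push_cast [h1]; ring
  have hx : PySem.Int.bxor ((2:Int) ^ i) ((2:Int) ^ n' - 1)
      = ((2 ^ i ^^^ (2 ^ n' - 1) : Nat) : Int) := by
    rw [hc1, hc2]
    exact_mod_cast PySem.Int.bxor_natCast (2 ^ i) (2 ^ n' - 1)
  rw [hx, pvBand_coe]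

theorem pvTb_uiN (u : Int) (n' i : Nat) (hi : i < n') (j : Nat) :
    (pvBandNat u (2 ^ i ^^^ (2 ^ n' - 1))).testBit j
      = ((pvBandNat u (2 ^ n' - 1)).testBit j && decide (j ≠ i)) := by
  rw [pvTb_bandNat, pvTb_bandNat]
  by_cases hj : j = i
  · subst hj
    simp [Nat.testBit_xor, Nat.testBit_two_pow_self, Nat.testBit_two_pow_sub_one, hi]
  · have hij : i ≠ j := fun h => hj h.symm
    by_cases h : j < n' <;>
      simp [Nat.testBit_xor, Nat.testBit_two_pow_sub_one, hij, hj, h]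

theorem pvBandNat_lt (u : Int) (n' : Nat) : pvBandNat u (2 ^ n' - 1) < 2 ^ n' := by
  apply Nat.lt_pow_two_of_testBit
  intro j hj
  rw [pvTb_bandNat, Nat.testBit_two_pow_sub_one]
  simp [Nat.not_lt.mpr hj]

theorem pvUiN_lt_pow (u : Int) (n' i : Nat) (hi : i < n') :
    pvBandNat u (2 ^ i ^^^ (2 ^ n' - 1)) < 2 ^ n' := by
  apply Nat.lt_pow_two_of_testBit
  intro j hj
  rw [pvTb_uiN u n' i hi, pvTb_bandNat, Nat.testBit_two_pow_sub_one]
  simp [Nat.not_lt.mpr hj]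

theorem pvSelf_band (w n' : Nat) (hw : w < 2 ^ n') :
    pvBandNat ((w : Nat) : Int) (2 ^ n' - 1) = w := by
  apply Nat.eq_of_testBit_eq
  intro j
  rw [pvTb_bandNat, pvUbit_coe, Nat.testBit_two_pow_sub_one]
  by_cases hj : j < n'
  · simp [hj]
  · have : w.testBit j = false := by
      apply Nat.testBit_lt_two_pow
      calc w < 2 ^ n' := hw
        _ ≤ 2 ^ j := Nat.pow_le_pow_right (by omega) (by omega)
    simp [hj, this]

theorem pvBits_uiN (u : Int) (n' i : Nat) (hi : i < n') :
    pvBits n' (pvBandNat u (2 ^ i ^^^ (2 ^ n' - 1)))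
      = (pvBits n' (pvBandNat u (2 ^ n' - 1))).filter (fun t => t ≠ i) := by
  unfold pvBits
  rw [List.filter_filter]
  apply List.filter_congr
  intro j hj
  rw [pvTb_uiN u n' i hi]
  rw [Bool.and_comm]

theorem pvFoldl_ite {α β : Type} (P : α → Prop) [DecidablePred P] (f : β → α → β) :
    ∀ (l : List α) (s : β),
      l.foldl (fun s a => if P a then f s a else s) s
        = (l.filter (fun a => decide (P a))).foldl f s := by
  intro l
  induction l with
  | nil => intro s; rfl
  | cons a l ih =>
    intro s
    rw [List.foldl_cons, List.filter_cons]
    by_cases h : P a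
    · simp only [h, if_true, decide_true]
      rw [List.foldl_cons]
      exact ih _
    · simp only [h, if_false, decide_false]
      exact ih s

theorem pvGo_eq (n u : Int) : ∀ (l : List (Fin n.toNat)) (s : List Int),
    lessthan_setGo n u l s
      = (l.map Fin.val).foldl
          (fun s i =>
            if PySem.Int.band u ((2:Int) ^ i) = (2:Int) ^ i then
              PySem.Set.update
                (PySem.Set.add s (PySem.Int.band u (PySem.Int.bxor ((2:Int) ^ i) ((2:Int) ^ n.toNat - 1))))
                (lessthan_set (PySem.Int.band u (PySem.Int.bxor ((2:Int) ^ i) ((2:Int) ^ n.toNat - 1))) n)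
            else s) s := by
  intro l
  induction l with
  | nil =>
    intro s
    rw [lessthan_setGo]
    simp
  | cons i rest ih =>
    intro s
    rw [lessthan_setGo]
    by_cases hg : PySem.Int.band u ((2:Int) ^ (i : Nat)) = (2:Int) ^ (i : Nat)
    · rw [dif_pos hg, ih, List.map_cons, List.foldl_cons, if_pos hg]
      rfl
    · rw [dif_neg hg, ih, List.map_cons, List.foldl_cons, if_neg hg]

theorem lessthan_set_eq_H : ∀ (u n : Int),
    lessthan_set u n = pvH (pvBits n.toNat (pvBandNat u (2 ^ n.toNat - 1))) := by
  have main : ∀ (n : Int) (m : Nat) (u : Int), pvBandNat u (2 ^ n.toNat - 1) = m →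
      lessthan_set u n = pvH (pvBits n.toNat m) := by
    intro n m
    induction m using Nat.strong_induction_on with
    | _ m IH =>
      intro u hm
      have hfull : (pvBits n.toNat m).Pairwise (· < ·) := pvBits_pairwise _ _
      show lessthan_set u n = _
      unfold lessthan_set
      rw [pvGo_eq, List.map_coe_finRange_eq_range, pvFoldl_ite]
      have hfil : (List.range n.toNat).filter
            (fun i => decide (PySem.Int.band u ((2:Int) ^ i) = (2:Int) ^ i))
          = pvBits n.toNat m := by
        unfold pvBits
        apply List.filter_congr
        intro j hj
        rw [List.mem_range] at hj
        rw [← hm]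
        have h := pvGuard_iff u n.toNat j hj
        rw [show ((pvBandNat u (2 ^ n.toNat - 1)).testBit j)
              = decide ((pvBandNat u (2 ^ n.toNat - 1)).testBit j = true) by simp]
        exact decide_eq_decide.mpr h
      rw [hfil]
      rw [PySem.List.foldl_congr_mem (pvBits n.toNat m) _ (pvStepA (pvBits n.toNat m)) [] ?step]
      · exact pvTA _ hfull
      case step =>
        intro acc j hjmem
        beta_reduce
        have hj := (pvMem_bits n.toNat m j).mp hjmem
        have hjn : j < n.toNat := hj.1
        have hbit : m.testBit j := hj.2
        have htbm : (pvBandNat u (2 ^ n.toNat - 1)).testBit j = true := by rw [hm]; exact hbit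
        set uiN := pvBandNat u (2 ^ j ^^^ (2 ^ n.toNat - 1)) with huiN
        have hcoe : PySem.Int.band u (PySem.Int.bxor ((2:Int) ^ j) ((2:Int) ^ n.toNat - 1))
            = ((uiN : Nat) : Int) := pvUi_coe u n.toNat j
        have hbitsui : pvBits n.toNat uiN = (pvBits n.toNat m).filter (fun t => t ≠ j) := by
          rw [huiN, pvBits_uiN u n.toNat j hjn, hm]
        have huival : ((uiN : Nat) : Int) = pvVal ((pvBits n.toNat m).filter (fun t => t ≠ j)) := by
          rw [← hbitsui]
          exact pvVal_bits n.toNat uiN (pvUiN_lt_pow u n.toNat j hjn)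
        have hmval : ((m : Nat) : Int) = pvVal (pvBits n.toNat m) := by
          apply pvVal_bits
          rw [← hm]
          exact pvBandNat_lt u n.toNat
        have hsplit := pvVal_split (pvBits n.toNat m) (pvBits_nodup _ _) j hjmem
        have hlt : uiN < m := by
          have h2 : ((uiN : Nat) : Int) + 2 ^ j = ((m : Nat) : Int) := by
            rw [huival, hmval, hsplit]; ring
          have hpos : (0:Int) < 2 ^ j := by positivity
          have : ((uiN : Nat) : Int) < ((m : Nat) : Int) := by omega
          exact_mod_cast this
        have hrec : lessthan_set ((uiN : Nat) : Int) n = pvH (pvBits n.toNat uiN) := by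
          rw [IH uiN hlt ((uiN : Nat) : Int) (pvSelf_band uiN n.toNat (pvUiN_lt_pow u n.toNat j hjn))]
        rw [hcoe, hrec, hbitsui, huival]
        rfl
  intro u n
  exact main n _ u rfl

def pvTbits (n' m k : Nat) : List Nat := (pvBits n' m).filter (fun j => decide (k ≤ j))

theorem pvTbits_top (n' m : Nat) : pvTbits n' m n' = [] := by
  apply List.filter_eq_nil_iff.mpr
  intro j hj
  have := (pvMem_bits n' m j).mp hj
  simp
  omega

theorem pvTbits_zero (n' m : Nat) : pvTbits n' m 0 = pvBits n' m :=
  List.filter_eq_self.mpr (fun a _ => by simp)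

theorem pvFilter_le_cons : ∀ (l : List Nat), l.Pairwise (· < ·) → ∀ k, k ∈ l →
    l.filter (fun j => decide (k ≤ j)) = k :: l.filter (fun j => decide (k + 1 ≤ j)) := by
  intro l
  induction l with
  | nil => intro _ k hk; simp at hk
  | cons a l ih =>
    intro hp k hk
    rw [List.pairwise_cons] at hp
    rcases List.mem_cons.mp hk with rfl | hkl
    · simp only [List.filter_cons]
      rw [if_pos (by simp), if_neg (by simp)]
      congr 1
      apply List.filter_congr
      intro j hj
      have := hp.1 j hj
      simp only [decide_eq_decide]
      omega
    · have hak : a < k := hp.1 k hkl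
      simp only [List.filter_cons]
      rw [if_neg (by simp; omega), if_neg (by simp; omega)]
      exact ih hp.2 k hkl

theorem pvTbits_cons (n' m k : Nat) (hk : k < n') (hbit : m.testBit k) :
    pvTbits n' m k = k :: pvTbits n' m (k + 1) :=
  pvFilter_le_cons (pvBits n' m) (pvBits_pairwise n' m) k
    ((pvMem_bits n' m k).mpr ⟨hk, hbit⟩)

theorem pvTbits_skip (n' m k : Nat) (h : m.testBit k = false) :
    pvTbits n' m k = pvTbits n' m (k + 1) := by
  apply List.filter_congr
  intro j hj
  have hjm := (pvMem_bits n' m j).mp hj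
  have : j ≠ k := fun he => by rw [he] at hjm; rw [h] at hjm; exact Bool.noConfusion hjm.2
  simp only [decide_eq_decide]
  omega

theorem pvAltGuard (m k : Nat) :
    (PySem.Int.band ((m : Int) >>> k) 1 = 1) ↔ m.testBit k = true := by
  have h1 : ((m : Int) >>> k) = ((m >>> k : Nat) : Int) := rfl
  have h2 : PySem.Int.mod ((m >>> k : Nat) : Int) 2 = (((m >>> k) % 2 : Nat) : Int) := by
    rw [show (2:Int) = ((2:Nat) : Int) by norm_num]
    exact PySem.Int.mod_natCast _ _
  rw [h1, PySem.Int.band_one, h2]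
  rw [Nat.testBit_eq_decide_div_mod_eq, ← Nat.shiftRight_eq_div_pow]
  constructor
  · intro h
    have h3 : (m >>> k) % 2 = 1 := by exact_mod_cast h
    simp [h3]
  · intro h
    simp only [decide_eq_true_eq] at h
    exact_mod_cast congrArg (Nat.cast : Nat → Int) h

theorem pvAltGo_inv (m n' : Nat) : ∀ k, k ≤ n' →
    lessthan_setAltGo ((m : Nat) : Int) k (pvH (pvTbits n' m k), pvVal (pvTbits n' m k))
      = (pvH (pvBits n' m), pvVal (pvBits n' m)) := by
  intro k
  induction k with
  | zero =>
    intro _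
    rw [pvTbits_zero]
    rfl
  | succ k ih =>
    intro hk
    rw [lessthan_setAltGo]
    have hsh : (1:Int) <<< k = 2 ^ k := by simp [Int.shiftLeft_eq]
    by_cases hbit : m.testBit k = true
    · rw [if_pos ((pvAltGuard m k).mpr hbit)]
      have hco := pvTbits_cons n' m k (by omega) hbit
      have hst : ((pvH (pvTbits n' m (k+1)) ++ (pvH (pvTbits n' m (k+1))).map (fun x => x + (2:Int) ^ k)).cons (pvVal (pvTbits n' m (k+1))),
          pvVal (pvTbits n' m k)) = (pvH (pvTbits n' m k), pvVal (pvTbits n' m k)) := by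
        rw [hco]
        simp [pvH]
      show lessthan_setAltGo _ k
          (pvVal (pvTbits n' m (k+1)) :: pvH (pvTbits n' m (k+1))
              ++ (pvH (pvTbits n' m (k+1))).map (fun x => x + (1:Int) <<< k),
            pvVal (pvTbits n' m (k+1)) + (1:Int) <<< k) = _
      rw [hsh]
      have h2 : pvVal (pvTbits n' m (k+1)) + (2:Int) ^ k = pvVal (pvTbits n' m k) := by
        rw [hco, pvVal_cons]; ring
      rw [h2]
      have h3 : (pvVal (pvTbits n' m (k+1)) :: pvH (pvTbits n' m (k+1))
              ++ (pvH (pvTbits n' m (k+1))).map (fun x => x + (2:Int) ^ k))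
          = pvH (pvTbits n' m k) := by
        rw [hco]
        simp [pvH]
      rw [h3]
      exact ih (by omega)
    · rw [if_neg (fun hc => hbit ((pvAltGuard m k).mp hc))]
      rw [← pvTbits_skip n' m k (Bool.eq_false_iff.mpr hbit)]
      exact ih (by omega)

theorem lessthan_set_alt_eq_H : ∀ (u n : Int),
    lessthan_set_alt u n = pvH (pvBits n.toNat (pvBandNat u (2 ^ n.toNat - 1))) := by
  intro u n
  unfold lessthan_set_alt
  by_cases hn : n ≤ 0
  · rw [if_pos hn]
    have : n.toNat = 0 := by omega
    rw [this]
    rfl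
  · rw [if_neg hn]
    have hmask : (1:Int) <<< n.toNat - 1 = ((2 ^ n.toNat - 1 : Nat) : Int) := by
      have h1 : (1:Nat) ≤ 2 ^ n.toNat := Nat.one_le_two_pow
      have h2 : (1:Int) <<< n.toNat = 2 ^ n.toNat := by simp [Int.shiftLeft_eq]
      rw [h2]
      push_cast [h1]
      ring
    rw [hmask, pvBand_coe]
    show PySem.Set.ofList
        (lessthan_setAltGo ((pvBandNat u (2 ^ n.toNat - 1) : Nat) : Int) n.toNat
          (([] : List Int), (0:Int))).1 = _
    have hstart : (([] : List Int), (0:Int))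
        = (pvH (pvTbits n.toNat (pvBandNat u (2 ^ n.toNat - 1)) n.toNat),
           pvVal (pvTbits n.toNat (pvBandNat u (2 ^ n.toNat - 1)) n.toNat)) := by
      rw [pvTbits_top]
      rfl
    rw [hstart, pvAltGo_inv _ n.toNat n.toNat (le_refl _)]
    exact PySem.Set.ofList_eq_self_of_nodup _ (pvH_nodup _ (pvBits_pairwise _ _))

-- ===== VERDICT (by name: the statement is the Claim_ definition above) =====
theorem lessthan_set_spec : Claim_equal_lessthan_set := by
  intro u n _
  unfold Spec_lessthan_set
  rw [lessthan_set_eq_H, lessthan_set_alt_eq_H]
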